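-- pv_equiv track=rewrite | github.com/PN-secure/wordle_unisolver | main.py | calculate_word_cut
-- ===== SOURCE A (Python) =====
-- def calculate_word_cut(word,word_list):
--     working_w_list = word_list.copy()
--     for i in range(len(word)):
--         for j in range(len(word_list)):
--             try:
--                 if word[i] == word_list[j][i]:
--                     working_w_list.remove(word_list[j])
--             except:
--                 pass
--     return len(word_list) - len(working_w_list)
-- ===== SOURCE B (Python) =====
-- def calculate_word_cut(word, word_list):
--     # Single pass: count the list words sharing at least one same-position letter with word.
--     return sum(1 for w in word_list if any(a == b for a, b in zip(word, w)))
-- ===== Notes on version B (the rewrite author's own statement) =====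
-- stated objective: faster
-- what changed: Replaces the per-position nested scan with repeated list.remove (each removal an O(N) scan) by a single pass that counts words with any same-position letter match, using zip to bound the comparison by the shorter length.
import Mathlib
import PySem

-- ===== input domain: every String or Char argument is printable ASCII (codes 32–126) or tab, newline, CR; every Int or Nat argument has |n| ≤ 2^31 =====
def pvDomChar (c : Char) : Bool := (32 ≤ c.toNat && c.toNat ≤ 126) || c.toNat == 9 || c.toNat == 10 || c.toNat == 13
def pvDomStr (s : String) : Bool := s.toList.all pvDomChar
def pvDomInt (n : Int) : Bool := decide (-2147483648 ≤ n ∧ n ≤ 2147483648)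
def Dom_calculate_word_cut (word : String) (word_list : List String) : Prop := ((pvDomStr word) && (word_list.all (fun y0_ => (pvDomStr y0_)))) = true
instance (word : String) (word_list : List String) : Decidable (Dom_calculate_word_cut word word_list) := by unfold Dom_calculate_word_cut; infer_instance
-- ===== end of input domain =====

-- B replaces A's per-position nested remove-scans by one counting pass over the list (faster); return value only, A does not mutate its arguments.

-- ===== PORT A =====
-- A-side helper: the try/except-guarded remove (ValueError caught → pass)
def pvTryRemove (w : List String) (v : String) : List String :=
  match PySem.List.remove? w v with
  | some w' => w'
  | none => w
-- A-side helper: the inner-loop body — word_list[j][i] (IndexError caught → pass), compare, remove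
def pvInnerBody (i : Int) (c : Char) (w : List String) (wj : String) : List String :=
  match PySem.Str.pyGet? wj i with
  | some d => if c == d then pvTryRemove w wj else w
  | none => w

def calculate_word_cut (word : String) (word_list : List String) : Int :=
  let working := (PySem.List.enumerate word.toList).foldl
      (fun w ic => word_list.foldl (pvInnerBody ic.1 ic.2) w) word_list
  (word_list.length : Int) - (working.length : Int)

-- ===== PORT B =====
def calculate_word_cut_alt (word : String) (word_list : List String) : Int :=
  ((word_list.countP (fun w => (word.toList.zip w.toList).any (fun p => p.1 == p.2))) : Int)

-- ===== PRECONDITION & SPEC =====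
def Spec_calculate_word_cut (word : String) (word_list : List String) (out : Int) : Prop := out = calculate_word_cut_alt word word_list
instance (word : String) (word_list : List String) (out : Int) : Decidable (Spec_calculate_word_cut word word_list out) := by unfold Spec_calculate_word_cut; infer_instance

-- ===== CLAIM (what is proved, stated in full; the proofs are below) =====
def Claim_equal_calculate_word_cut : Prop := ∀ (word : String) (word_list : List String), Dom_calculate_word_cut word word_list → Spec_calculate_word_cut word word_list (calculate_word_cut word word_list)

-- ===== LEMMAS AND PROOFS =====

-- a list word "matched" word within the first k positions
def pvMatchUpTo (word w : List Char) (k : Nat) : Bool :=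
  ((word.zip w).take k).any (fun p => p.1 == p.2)

-- a list word matches word exactly at position k
def pvMatchAt (word w : List Char) (k : Nat) : Bool :=
  match word[k]?, w[k]? with
  | some c, some d => c == d
  | _, _ => false

theorem pv_zip_getElem? (xs ys : List Char) (k : Nat) :
    (xs.zip ys)[k]? = match xs[k]?, ys[k]? with
      | some a, some b => some (a, b)
      | _, _ => none := by
  induction xs generalizing ys k with
  | nil => simp
  | cons x xs ih =>
    cases ys with
    | nil => cases k <;> simp
    | cons y ys =>
      cases k with
      | zero => simp
      | succ k => simpa using ih ys k

theorem pvMatchUpTo_succ (word w : List Char) (k : Nat) :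
    pvMatchUpTo word w (k+1) = (pvMatchUpTo word w k || pvMatchAt word w k) := by
  unfold pvMatchUpTo pvMatchAt
  rw [List.take_add_one, List.any_append, pv_zip_getElem?]
  cases word[k]? <;> cases w[k]? <;> simp

-- inner invariant: running the j-loop at position i over R, starting from
-- (L filtered by "no match < i+1") ++ (R filtered by "no match < i"), yields (L++R) filtered by "no match < i+1"
theorem pv_inner_inv (word : List Char) (i : Nat) (c : Char) (hc : word[i]? = some c) :
    ∀ (R L : List String),
      R.foldl (pvInnerBody (i : Int) c)
        (L.filter (fun w => !pvMatchUpTo word w.toList (i+1)) ++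
         R.filter (fun w => !pvMatchUpTo word w.toList i))
      = (L ++ R).filter (fun w => !pvMatchUpTo word w.toList (i+1)) := by
  intro R
  induction R with
  | nil => intro L; simp
  | cons wj R' ih =>
    intro L
    have hstep : pvInnerBody (i : Int) c
        (L.filter (fun w => !pvMatchUpTo word w.toList (i+1)) ++
         (wj :: R').filter (fun w => !pvMatchUpTo word w.toList i)) wj
        = (L ++ [wj]).filter (fun w => !pvMatchUpTo word w.toList (i+1)) ++
          R'.filter (fun w => !pvMatchUpTo word w.toList i) := by
      unfold pvInnerBody
      rw [PySem.Str.pyGet?_natCast]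
      cases hdj : wj.toList[i]? with
      | none =>
        -- IndexError at word_list[j][i] → pass; wj cannot match at i
        have hat : pvMatchAt word wj.toList i = false := by
          unfold pvMatchAt; rw [hc, hdj]
        have hkeq : pvMatchUpTo word wj.toList (i+1) = pvMatchUpTo word wj.toList i := by
          rw [pvMatchUpTo_succ, hat]; simp
        simp only [List.filter_append, List.filter_cons, hkeq]
        by_cases hmi : pvMatchUpTo word wj.toList i = true <;> simp [hmi]
      | some d =>
        have hat : pvMatchAt word wj.toList i = (c == d) := by
          unfold pvMatchAt; rw [hc, hdj]
        by_cases hdc : (c == d) = true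
        · -- a match at position i
          simp only [hdc, if_true]
          have hmk1 : pvMatchUpTo word wj.toList (i+1) = true := by
            rw [pvMatchUpTo_succ, hat, hdc]; simp
          by_cases hmi : pvMatchUpTo word wj.toList i = true
          · -- matched at an earlier position already: wj occurs nowhere, remove fails (pass)
            have hnot : wj ∉ L.filter (fun w => !pvMatchUpTo word w.toList (i+1)) ++
                (wj :: R').filter (fun w => !pvMatchUpTo word w.toList i) := by
              intro hmem
              rcases List.mem_append.1 hmem with h | h
              · have := List.of_mem_filter h; rw [hmk1] at this; exact absurd this (by simp)
              · have := List.of_mem_filter h; rw [hmi] at this; exact absurd this (by simp)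
            unfold pvTryRemove
            rw [(PySem.List.remove?_eq_none_iff _ _).2 hnot]
            simp [List.filter_append, hmi, hmk1]
          · -- first match: wj sits exactly at the boundary, remove takes it out
            have hmi' : pvMatchUpTo word wj.toList i = false := by simpa using hmi
            have hnotL : wj ∉ L.filter (fun w => !pvMatchUpTo word w.toList (i+1)) := by
              intro hmem
              have := List.of_mem_filter hmem; rw [hmk1] at this; exact absurd this (by simp)
            have hshape : (wj :: R').filter (fun w => !pvMatchUpTo word w.toList i)
                = wj :: R'.filter (fun w => !pvMatchUpTo word w.toList i) := by
              simp [hmi']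
            rw [hshape]
            unfold pvTryRemove
            have hmem : wj ∈ L.filter (fun w => !pvMatchUpTo word w.toList (i+1)) ++
                wj :: R'.filter (fun w => !pvMatchUpTo word w.toList i) := by simp
            rw [PySem.List.remove?_eq_some_erase _ _ hmem]
            rw [List.erase_append_right _ hnotL, List.erase_cons_head]
            simp [List.filter_append, hmk1]
        · -- letters differ → no removal; wj cannot match at i
          simp only [hdc]
          have hat' : pvMatchAt word wj.toList i = false := by
            rw [hat]; simpa using hdc
          have hkeq : pvMatchUpTo word wj.toList (i+1) = pvMatchUpTo word wj.toList i := by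
            rw [pvMatchUpTo_succ, hat']; simp
          simp only [List.filter_append, List.filter_cons, hkeq]
          by_cases hmi : pvMatchUpTo word wj.toList i = true <;> simp [hmi]
    rw [List.foldl_cons, hstep]
    simpa using ih (L ++ [wj])

-- outer invariant: folding positions k,k+1,… of word over a state filtered by "no match < k"
theorem pv_outer_inv (word : List Char) (word_list : List String) :
    ∀ (tl : List Char) (k : Nat), word.drop k = tl →
      (PySem.List.enumerate tl (k : Int)).foldl
        (fun w ic => word_list.foldl (pvInnerBody ic.1 ic.2) w)
        (word_list.filter (fun w => !pvMatchUpTo word w.toList k))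
      = word_list.filter (fun w => !pvMatchUpTo word w.toList (k + tl.length)) := by
  intro tl
  induction tl with
  | nil => intro k _; simp [PySem.List.enumerate]
  | cons c tl' ih =>
    intro k hdrop
    have hk : k < word.length := by
      by_contra h
      rw [List.drop_eq_nil_of_le (Nat.le_of_not_lt h)] at hdrop
      exact List.cons_ne_nil _ _ hdrop.symm
    have hc : word[k]? = some c := by
      have h0 : (word.drop k)[0]? = word[k + 0]? := List.getElem?_drop
      rw [hdrop] at h0
      simpa using h0.symm
    rw [PySem.List.enumerate_cons, List.foldl_cons]
    have hinner := pv_inner_inv word k c hc word_list []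
    simp only [List.filter_nil, List.nil_append] at hinner
    rw [hinner]
    have hdrop' : word.drop (k+1) = tl' := by
      have h1 : word.drop (k+1) = (word.drop k).drop 1 := by
        rw [List.drop_drop]
      rw [h1, hdrop]; rfl
    have hres := ih (k+1) hdrop'
    rw [show ((k : Int) + 1) = ((k+1 : Nat) : Int) by push_cast; ring]
    rw [hres]
    have harith : k + 1 + tl'.length = k + (c :: tl').length := by
      simp [List.length_cons]; omega
    rw [harith]

theorem pvMatchUpTo_full (word w : List Char) :
    pvMatchUpTo word w word.length = (word.zip w).any (fun p => p.1 == p.2) := by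
  unfold pvMatchUpTo
  rw [List.take_of_length_le (le_trans (List.length_zip ..).le (min_le_left _ _))]

theorem pv_filter_not_len (l : List String) (f : String → Bool) :
    (l.filter (fun w => !f w)).length + l.countP f = l.length := by
  induction l with
  | nil => rfl
  | cons x xs ih =>
    by_cases h : f x = true <;> simp [h] <;> omega

-- ===== VERDICT (by name: the statement is the Claim_ definition above) =====
theorem calculate_word_cut_spec : Claim_equal_calculate_word_cut := by
  intro word word_list _
  unfold Spec_calculate_word_cut
  simp only [calculate_word_cut, calculate_word_cut_alt]
  have h0 : word_list.filter (fun w => !pvMatchUpTo word.toList w.toList 0) = word_list := by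
    simp [pvMatchUpTo]
  have hmain := pv_outer_inv word.toList word_list word.toList 0 rfl
  rw [h0] at hmain
  simp only [Nat.zero_add] at hmain
  rw [show ((0 : Nat) : Int) = (0 : Int) from rfl] at hmain
  rw [hmain]
  have hfull : word_list.filter (fun w => !pvMatchUpTo word.toList w.toList word.toList.length)
      = word_list.filter (fun w => !((word.toList.zip w.toList).any (fun p => p.1 == p.2))) := by
    apply List.filter_congr
    intro w _
    rw [pvMatchUpTo_full]
  rw [hfull]
  have hcount := pv_filter_not_len word_list (fun w => (word.toList.zip w.toList).any (fun p => p.1 == p.2))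
  omega
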